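-- pv_equiv track=rewrite | github.com/jhs9497/TIL | 2021_하반기/알고리즘/백준/백3687_성냥개비.py | cal_Max
-- ===== SOURCE A (Python) =====
-- def cal_Max(c):
--     answer = ''
--     if c % 2 == 0:
--         while c > 0:
--             answer += '1'
--             c -= 2
--     else:
--         answer += '7'
--         c -= 3
--         while c > 0:
--             answer += '1'
--             c -= 2
--     return answer
-- ===== SOURCE B (Python) =====
-- def cal_Max(c):
--     if c % 2 == 0:
--         return '1' * (c // 2)
--     return '7' + '1' * ((c - 3) // 2)
-- ===== Notes on version B (the rewrite author's own statement) =====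
-- stated objective: simpler
-- what changed: Replaces the subtract-by-2 while loops that append '1' one at a time with a closed-form construction: the count of '1's is computed by integer floor division and the string built with one repetition.
import Mathlib
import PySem

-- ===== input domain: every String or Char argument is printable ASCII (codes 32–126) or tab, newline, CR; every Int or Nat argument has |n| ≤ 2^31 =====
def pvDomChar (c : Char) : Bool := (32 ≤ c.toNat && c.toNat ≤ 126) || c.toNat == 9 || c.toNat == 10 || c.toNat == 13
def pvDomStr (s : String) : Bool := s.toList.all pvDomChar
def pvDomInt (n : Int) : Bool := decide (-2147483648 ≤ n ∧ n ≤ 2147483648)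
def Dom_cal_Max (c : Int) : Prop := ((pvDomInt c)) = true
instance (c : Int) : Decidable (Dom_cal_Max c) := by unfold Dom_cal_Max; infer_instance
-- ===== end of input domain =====

-- B replaces A's subtract-by-2 append loops with a closed-form string: the count of '1's comes from floor division.


-- ===== PORT A =====
-- the 'while c > 0: answer += '1'; c -= 2' loop
def pvLoopA (c : Int) (answer : List Char) : List Char :=
  if c > 0 then pvLoopA (c - 2) (answer ++ ['1']) else answer
termination_by c.toNat
decreasing_by omega

def cal_Max (c : Int) : String :=
  if PySem.Int.mod c 2 = 0 then
    String.ofList (pvLoopA c [])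
  else
    String.ofList (pvLoopA (c - 3) (['7']))

-- ===== PORT B =====
def cal_Max_alt (c : Int) : String :=
  if PySem.Int.mod c 2 = 0 then
    String.ofList (PySem.List.pyRepeat ['1'] (PySem.Int.floordiv c 2))
  else
    String.ofList ('7' :: PySem.List.pyRepeat ['1'] (PySem.Int.floordiv (c - 3) 2))

-- ===== PRECONDITION & SPEC =====
def Spec_cal_Max (c : Int) (out : String) : Prop := out = cal_Max_alt c
instance (c : Int) (out : String) : Decidable (Spec_cal_Max c out) := by unfold Spec_cal_Max; infer_instance

-- ===== CLAIM (what is proved, stated in full; the proofs are below) =====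
def Claim_equal_cal_Max : Prop := ∀ (c : Int), Dom_cal_Max c → Spec_cal_Max c (cal_Max c)

-- ===== LEMMAS AND PROOFS =====
-- For even c, the loop appends exactly (c // 2).toNat copies of '1'.
theorem pvLoopA_even (n : Nat) : ∀ (c : Int), c.toNat ≤ n → c % 2 = 0 → ∀ (answer : List Char),
    pvLoopA c answer = answer ++ List.replicate ((PySem.Int.floordiv c 2).toNat) '1' := by
  induction n with
  | zero =>
    intro c hc _ answer
    rw [pvLoopA]
    have hc0 : ¬ c > 0 := by omega
    have : (PySem.Int.floordiv c 2).toNat = 0 := by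
      simp [PySem.Int.floordiv, Int.fdiv_eq_ediv]; omega
    rw [if_neg hc0, this]; simp
  | succ n ih =>
    intro c hc heven answer
    rw [pvLoopA]
    by_cases hpos : c > 0
    · have h2 : (c - 2) % 2 = 0 := by omega
      have hle : (c - 2).toNat ≤ n := by omega
      rw [if_pos hpos, ih (c - 2) hle h2]
      have hq : (PySem.Int.floordiv c 2).toNat = (PySem.Int.floordiv (c - 2) 2).toNat + 1 := by
        simp [PySem.Int.floordiv, Int.fdiv_eq_ediv]; omega
      rw [hq, List.replicate_succ, List.append_assoc]
      rfl
    · have : (PySem.Int.floordiv c 2).toNat = 0 := by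
        simp [PySem.Int.floordiv, Int.fdiv_eq_ediv]; omega
      rw [if_neg hpos, this]; simp

-- ===== VERDICT (by name: the statement is the Claim_ definition above) =====
theorem cal_Max_spec : Claim_equal_cal_Max := by
  intro c _
  unfold Spec_cal_Max cal_Max cal_Max_alt
  by_cases h : PySem.Int.mod c 2 = 0
  · have heven : c % 2 = 0 := by
      have hfm : c.fmod 2 = c % 2 := by simp [Int.fmod_eq_emod]
      simp [PySem.Int.mod, hfm] at h; omega
    rw [if_pos h, if_pos h, pvLoopA_even c.toNat c le_rfl heven,
      PySem.List.pyRepeat_singleton]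
    simp
  · have hfm : c.fmod 2 = c % 2 := by simp [Int.fmod_eq_emod]
    have hodd : (c - 3) % 2 = 0 := by
      simp [PySem.Int.mod, hfm] at h; omega
    rw [if_neg h, if_neg h,
      pvLoopA_even (c - 3).toNat (c - 3) le_rfl hodd,
      PySem.List.pyRepeat_singleton]
    simp
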